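-- pv_equiv track=rewrite | github.com/pallaviB463/Chemical_Equation_Balancer-and-Simulator-LinearAlgebra-Pipeline- | app.py | check_elements
-- ===== SOURCE A (Python) =====
-- def parse_compound(formula):
--     """
--     Recursive descent parser for chemical formulas.
--     Handles: simple (H2O), multi-letter elements (Fe, Ca),
--              parentheses (Ca(OH)2), nested groups (Al2(SO4)3).
--     Returns dict {element: count}.
--     """
--     def parse_tokens(s, i=0):
--         counts = {}
--         while i < len(s):
--             if s[i] == '(':
--                 sub, i = parse_tokens(s, i + 1)
--                 num_start = i
--                 while i < len(s) and s[i].isdigit():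
--                     i += 1
--                 multiplier = int(s[num_start:i]) if i > num_start else 1
--                 for el, cnt in sub.items():
--                     counts[el] = counts.get(el, 0) + cnt * multiplier
--             elif s[i] == ')':
--                 return counts, i + 1
--             elif s[i].isupper():
--                 j = i + 1
--                 while j < len(s) and s[j].islower():
--                     j += 1
--                 el = s[i:j]
--                 i = j
--                 num_start = i
--                 while i < len(s) and s[i].isdigit():
--                     i += 1
--                 num = int(s[num_start:i]) if i > num_start else 1
--                 counts[el] = counts.get(el, 0) + num
--             else:
--                 i += 1
--         return counts, i
--
--     result, _ = parse_tokens(formula)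
--     return result
--
-- def check_elements(reactants, products):
--     """Returns (balanced_bool, left_only_set, right_only_set)"""
--     left  = set()
--     right = set()
--     for c in reactants:
--         left.update(parse_compound(c).keys())
--     for c in products:
--         right.update(parse_compound(c).keys())
--     return (left == right), (left - right), (right - left)
-- ===== SOURCE B (Python) =====
-- def check_elements(reactants, products):
--     """Returns (balanced_bool, left_only_set, right_only_set)"""
--     def elements(c):
--         # every maximal run "uppercase letter + following lowercase letters" is an element name;
--         # digits, parentheses and anything else only separate names, so counts never matter
--         out = []
--         i = 0
--         while i < len(c):
--             if c[i].isupper():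
--                 j = i + 1
--                 while j < len(c) and c[j].islower():
--                     j += 1
--                 out.append(c[i:j])
--                 i = j
--             else:
--                 i += 1
--         return out
--     left = set()
--     right = set()
--     for c in reactants:
--         left.update(elements(c))
--     for c in products:
--         right.update(elements(c))
--     return (left == right), (left - right), (right - left)
-- ===== Notes on version B (the rewrite author's own statement) =====
-- stated objective: simpler
-- what changed: B replaces the recursive-descent formula parser (counts, parentheses, group multipliers, dict merging) with a single linear scan per formula that collects every 'uppercase letter + following lowercase run' element name directly into the sets.
-- outside the precondition, e.g. on check_elements(['A)B'], ['AB']): A returns (False, set(), {'B'}), B returns (True, set(), set())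
import Mathlib
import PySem

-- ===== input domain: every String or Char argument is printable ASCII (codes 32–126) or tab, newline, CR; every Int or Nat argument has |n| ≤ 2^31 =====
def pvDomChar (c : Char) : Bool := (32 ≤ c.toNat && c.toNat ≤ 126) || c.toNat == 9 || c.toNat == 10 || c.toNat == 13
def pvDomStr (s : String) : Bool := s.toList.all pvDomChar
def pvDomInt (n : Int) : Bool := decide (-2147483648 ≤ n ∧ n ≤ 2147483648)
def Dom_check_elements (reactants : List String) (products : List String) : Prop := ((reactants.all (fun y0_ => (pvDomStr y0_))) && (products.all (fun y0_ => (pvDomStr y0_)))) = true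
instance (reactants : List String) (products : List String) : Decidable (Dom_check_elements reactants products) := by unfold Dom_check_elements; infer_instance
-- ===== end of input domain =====

-- B drops A's recursive-descent parser (counts, parentheses, multipliers) and collects the element
-- names directly by one linear scan per formula; same element sets, simpler (objective: simpler).

-- ===== PORT A =====
-- 'int(s[num_start:i]) if i > num_start else 1' — digits is the scanned digit run; ofChars? never
-- returns none on a nonempty digit run, so getD 0 is unreachable.
def pvIntOf (digits : List Char) : Int :=
  if digits.isEmpty then 1 else (PySem.Int.ofChars? digits).getD 0

-- parse_tokens(s, i): ported over the remaining character list; the fuel argument only makes the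
-- recursion structural — fuel = len(s)+1 is never exhausted (each nested call consumes ≥ 1 char).
-- The index-scanning while loops become takeWhile/dropWhile over the same characters.
def pvParseTokens : Nat → List Char → PySem.Dict String Int → PySem.Dict String Int × List Char
  | 0, s, counts => (counts, s)
  | fuel+1, s, counts =>
    match s with
    | [] => (counts, [])
    | c :: r =>
      if c = '(' then
        let p := pvParseTokens fuel r PySem.Dict.empty
        pvParseTokens fuel (p.2.dropWhile PySem.Chars.isdigit)
          (p.1.items.foldl
            (fun d q => d.modify q.1 0 (fun v => v + q.2 * pvIntOf (p.2.takeWhile PySem.Chars.isdigit)))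
            counts)
      else if c = ')' then (counts, r)
      else if PySem.Chars.isupper c then
        let el := String.ofList (c :: r.takeWhile PySem.Chars.islower)
        let r1 := r.dropWhile PySem.Chars.islower
        pvParseTokens fuel (r1.dropWhile PySem.Chars.isdigit)
          (counts.modify el 0 (fun v => v + pvIntOf (r1.takeWhile PySem.Chars.isdigit)))
      else pvParseTokens fuel r counts

def pvParseCompound (formula : String) : PySem.Dict String Int :=
  (pvParseTokens (formula.toList.length + 1) formula.toList PySem.Dict.empty).1

def check_elements (reactants : List String) (products : List String) : Bool × List String × List String :=
  let left := reactants.foldl (fun acc c => PySem.Set.update acc (pvParseCompound c).keys) PySem.Set.empty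
  let right := products.foldl (fun acc c => PySem.Set.update acc (pvParseCompound c).keys) PySem.Set.empty
  (PySem.Set.equal left right, PySem.Set.diff left right, PySem.Set.diff right left)

-- ===== PORT B =====
-- elements(c): one scan, collecting every "uppercase letter + following lowercase run".
def pvTok : List Char → List String
  | [] => []
  | c :: r =>
    if PySem.Chars.isupper c then
      String.ofList (c :: r.takeWhile PySem.Chars.islower) :: pvTok (r.dropWhile PySem.Chars.islower)
    else pvTok r
termination_by l => l.length
decreasing_by
  · simpa using Nat.lt_succ_of_le (List.length_dropWhile_le _ _)
  · simp

def check_elements_alt (reactants : List String) (products : List String) : Bool × List String × List String :=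
  let left := reactants.foldl (fun acc c => PySem.Set.update acc (pvTok c.toList)) PySem.Set.empty
  let right := products.foldl (fun acc c => PySem.Set.update acc (pvTok c.toList)) PySem.Set.empty
  (PySem.Set.equal left right, PySem.Set.diff left right, PySem.Set.diff right left)

-- ===== PRECONDITION & SPEC =====
-- pvOk k cs (k = unmatched '(' seen so far) is false exactly when cs contains an unmatched ')'
-- that is followed by a further uppercase letter, i.e. by at least one further element name.
def pvOk : Nat → List Char → Bool
  | _, [] => true
  | k, c :: r =>
    if c = '(' then pvOk (k+1) r
    else if c = ')' then
      match k with
      | 0 => r.all (fun x => !PySem.Chars.isupper x)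
      | k'+1 => pvOk k' r
    else pvOk k r

-- Pre_ excludes inputs in which some formula string contains an unmatched ')' with an element name
-- after it: there A's parser returns early and silently drops the rest of that formula — a
-- defensible reading of malformed input that B (which reads the whole string) does not reproduce.
def Pre_check_elements (reactants : List String) (products : List String) : Prop :=
  (reactants ++ products).all (fun c => pvOk 0 c.toList) = true
instance (reactants : List String) (products : List String) : Decidable (Pre_check_elements reactants products) := by unfold Pre_check_elements; infer_instance

def pvWitness_check_elements : List String × List String := (["Ca(OH)2", "H3PO4"], ["Ca3(PO4)2", "H2O"])

def Spec_check_elements (reactants : List String) (products : List String) (out : Bool × List String × List String) : Prop := out = check_elements_alt reactants products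
instance (reactants : List String) (products : List String) (out : Bool × List String × List String) : Decidable (Spec_check_elements reactants products out) := by unfold Spec_check_elements; infer_instance

-- ===== CLAIM (what is proved, stated in full; the proofs are below) =====
def Claim_equal_check_elements : Prop := ∀ (reactants : List String) (products : List String), Dom_check_elements reactants products → Pre_check_elements reactants products → Spec_check_elements reactants products (check_elements reactants products)

-- ===== LEMMAS AND PROOFS =====

theorem pvTok_skip_one (c : Char) (r : List Char) (h : PySem.Chars.isupper c = false) :
    pvTok (c :: r) = pvTok r := by
  rw [pvTok]; simp [h]

theorem pvTok_cons_upper (c : Char) (r : List Char) (h : PySem.Chars.isupper c = true) :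
    pvTok (c :: r) =
      String.ofList (c :: r.takeWhile PySem.Chars.islower) :: pvTok (r.dropWhile PySem.Chars.islower) := by
  rw [pvTok]; simp [h]

theorem pvTok_skip (l r : List Char) (h : ∀ c ∈ l, PySem.Chars.isupper c = false) :
    pvTok (l ++ r) = pvTok r := by
  induction l with
  | nil => simp
  | cons c t ih =>
    rw [List.cons_append, pvTok_skip_one c _ (h c (by simp)), ih (fun x hx => h x (by simp [hx]))]

theorem isupper_of_isdigit (c : Char) (h : PySem.Chars.isdigit c = true) :
    PySem.Chars.isupper c = false := by
  simp [PySem.Chars.isdigit, PySem.Chars.isupper, Char.le_def, UInt32.le_iff_toNat_le] at *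
  omega

theorem pvPT_paren (fuel : Nat) (r : List Char) (counts : PySem.Dict String Int) :
    pvParseTokens (fuel+1) ('('::r) counts = pvParseTokens fuel
      (((pvParseTokens fuel r PySem.Dict.empty).2).dropWhile PySem.Chars.isdigit)
      ((pvParseTokens fuel r PySem.Dict.empty).1.items.foldl
        (fun d q => d.modify q.1 0 (fun v => v + q.2 * pvIntOf ((pvParseTokens fuel r PySem.Dict.empty).2.takeWhile PySem.Chars.isdigit)))
        counts) := rfl

theorem pvPT_close (fuel : Nat) (r : List Char) (counts : PySem.Dict String Int) :
    pvParseTokens (fuel+1) (')'::r) counts = (counts, r) := rfl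

theorem pvPT_upper (fuel : Nat) (c : Char) (r : List Char) (counts : PySem.Dict String Int)
    (h1 : ¬ c = '(') (h2 : ¬ c = ')') (h3 : PySem.Chars.isupper c = true) :
    pvParseTokens (fuel+1) (c::r) counts = pvParseTokens fuel
      ((r.dropWhile PySem.Chars.islower).dropWhile PySem.Chars.isdigit)
      (counts.modify (String.ofList (c :: r.takeWhile PySem.Chars.islower)) 0
        (fun v => v + pvIntOf ((r.dropWhile PySem.Chars.islower).takeWhile PySem.Chars.isdigit))) := by
  show (if c = '(' then _ else if c = ')' then _ else if PySem.Chars.isupper c then _ else _ : PySem.Dict String Int × List Char) = _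
  rw [if_neg h1, if_neg h2, if_pos h3]

theorem pvPT_other (fuel : Nat) (c : Char) (r : List Char) (counts : PySem.Dict String Int)
    (h1 : ¬ c = '(') (h2 : ¬ c = ')') (h3 : ¬ PySem.Chars.isupper c = true) :
    pvParseTokens (fuel+1) (c::r) counts = pvParseTokens fuel r counts := by
  show (if c = '(' then _ else if c = ')' then _ else if PySem.Chars.isupper c then _ else _ : PySem.Dict String Int × List Char) = _
  rw [if_neg h1, if_neg h2, if_neg h3]

theorem pvTok_skip_digits (ds r : List Char) (h : ∀ c ∈ ds, PySem.Chars.isdigit c = true) :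
    pvTok (ds ++ r) = pvTok r :=
  pvTok_skip ds r (fun c hc => isupper_of_isdigit c (h c hc))

theorem update_add (α : Type) [BEq α] [LawfulBEq α] (s acc : PySem.Set α) (x : α) :
    PySem.Set.update s (PySem.Set.add acc x) = PySem.Set.add (PySem.Set.update s acc) x := by
  by_cases hx : x ∈ acc
  · have h1 : PySem.Set.add acc x = acc := by
      simp [PySem.Set.add, PySem.Set.contains, hx]
    have h2 : PySem.Set.add (PySem.Set.update s acc) x = PySem.Set.update s acc := by
      have : x ∈ PySem.Set.update s acc := (PySem.Set.mem_update s acc x).mpr (Or.inr hx)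
      simp [PySem.Set.add, PySem.Set.contains, this]
    rw [h1, h2]
  · have h1 : PySem.Set.add acc x = acc ++ [x] := by
      simp [PySem.Set.add, PySem.Set.contains, hx]
    rw [h1]
    show List.foldl PySem.Set.add s (acc ++ [x]) = _
    rw [List.foldl_append]
    rfl

theorem update_update (α : Type) [BEq α] [LawfulBEq α] (l : List α) (s acc : PySem.Set α) :
    PySem.Set.update s (PySem.Set.update acc l) = PySem.Set.update (PySem.Set.update s acc) l := by
  induction l generalizing acc s with
  | nil => rfl
  | cons x t ih =>
    show PySem.Set.update s (PySem.Set.update (PySem.Set.add acc x) t) = _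
    rw [ih, update_add]
    rfl

theorem update_set_update_nil (α : Type) [BEq α] [LawfulBEq α] (s : PySem.Set α) (l : List α) :
    PySem.Set.update s (PySem.Set.update [] l) = PySem.Set.update s l := by
  have := update_update α l s []
  simpa [PySem.Set.update] using this

theorem update_append (α : Type) [BEq α] (s : PySem.Set α) (l1 l2 : List α) :
    PySem.Set.update s (l1 ++ l2) = PySem.Set.update (PySem.Set.update s l1) l2 :=
  List.foldl_append

theorem parse_rest_len (fuel : Nat) (s : List Char) (counts : PySem.Dict String Int) :
    (pvParseTokens fuel s counts).2.length ≤ s.length := by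
  induction fuel generalizing s counts with
  | zero => simp [pvParseTokens]
  | succ fuel ih =>
    cases s with
    | nil => simp [pvParseTokens]
    | cons c r =>
      by_cases h1 : c = '('
      · show ((if c = '(' then _ else _ : PySem.Dict String Int × List Char)).2.length ≤ _
        rw [if_pos h1]
        exact le_trans (ih _ _)
          (le_trans (List.length_dropWhile_le _ _) (le_trans (ih _ _) (Nat.le_succ _)))
      · by_cases h2 : c = ')'
        · show ((if c = '(' then _ else if c = ')' then _ else _ : PySem.Dict String Int × List Char)).2.length ≤ _
          rw [if_neg h1, if_pos h2]
          exact Nat.le_succ _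
        · by_cases h3 : PySem.Chars.isupper c
          · show ((if c = '(' then _ else if c = ')' then _ else if PySem.Chars.isupper c then _ else _ : PySem.Dict String Int × List Char)).2.length ≤ _
            rw [if_neg h1, if_neg h2, if_pos h3]
            exact le_trans (ih _ _)
              (le_trans (List.length_dropWhile_le _ _)
                (le_trans (List.length_dropWhile_le _ _) (Nat.le_succ _)))
          · show ((if c = '(' then _ else if c = ')' then _ else if PySem.Chars.isupper c then _ else _ : PySem.Dict String Int × List Char)).2.length ≤ _
            rw [if_neg h1, if_neg h2, if_neg h3]
            exact le_trans (ih _ _) (Nat.le_succ _)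

-- parse_tokens consumes a prefix whose element tokens ts are exactly the keys it appends
theorem parse_keys (fuel : Nat) (s : List Char) (counts : PySem.Dict String Int) :
    ∃ ts, pvTok s = ts ++ pvTok (pvParseTokens fuel s counts).2 ∧
      (pvParseTokens fuel s counts).1.keys = PySem.Set.update counts.keys ts := by
  induction fuel generalizing s counts with
  | zero => exact ⟨[], by simp [pvParseTokens], by simp [pvParseTokens, PySem.Set.update]⟩
  | succ fuel ih =>
    cases s with
    | nil => exact ⟨[], by simp [pvParseTokens, pvTok], by simp [pvParseTokens, PySem.Set.update]⟩
    | cons c r =>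
      by_cases h1 : c = '('
      · subst h1
        rw [pvPT_paren]
        obtain ⟨ts1, ht1, hk1⟩ := ih r PySem.Dict.empty
        obtain ⟨ts2, ht2, hk2⟩ := ih ((pvParseTokens fuel r PySem.Dict.empty).2.dropWhile PySem.Chars.isdigit)
          ((pvParseTokens fuel r PySem.Dict.empty).1.items.foldl
            (fun d q => d.modify q.1 0 (fun v => v + q.2 * pvIntOf ((pvParseTokens fuel r PySem.Dict.empty).2.takeWhile PySem.Chars.isdigit)))
            counts)
        refine ⟨ts1 ++ ts2, ?_, ?_⟩
        · have hsplit : pvTok (pvParseTokens fuel r PySem.Dict.empty).2 =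
              pvTok ((pvParseTokens fuel r PySem.Dict.empty).2.dropWhile PySem.Chars.isdigit) := by
            conv_lhs => rw [← List.takeWhile_append_dropWhile (p := PySem.Chars.isdigit)
              (l := (pvParseTokens fuel r PySem.Dict.empty).2)]
            exact pvTok_skip_digits _ _ (fun x hx => List.mem_takeWhile_imp hx)
          rw [pvTok_skip_one '(' r (by decide), ht1, hsplit, ht2, List.append_assoc]
        · rw [hk2, PySem.Dict.keys_foldl_modify_key, update_append]
          have : ((pvParseTokens fuel r PySem.Dict.empty).1.items.map (fun q => q.1)) =
              (pvParseTokens fuel r PySem.Dict.empty).1.keys := rfl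
          rw [this, hk1]
          have he : (PySem.Dict.empty : PySem.Dict String Int).keys = [] := rfl
          rw [he, update_set_update_nil]
      · by_cases h2 : c = ')'
        · subst h2
          rw [pvPT_close]
          exact ⟨[], by rw [pvTok_skip_one ')' r (by decide)]; rfl, by simp [PySem.Set.update]⟩
        · by_cases h3 : PySem.Chars.isupper c
          · rw [pvPT_upper fuel c r counts h1 h2 h3]
            obtain ⟨ts2, ht2, hk2⟩ := ih ((r.dropWhile PySem.Chars.islower).dropWhile PySem.Chars.isdigit)
              (counts.modify (String.ofList (c :: r.takeWhile PySem.Chars.islower)) 0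
                (fun v => v + pvIntOf ((r.dropWhile PySem.Chars.islower).takeWhile PySem.Chars.isdigit)))
            refine ⟨String.ofList (c :: r.takeWhile PySem.Chars.islower) :: ts2, ?_, ?_⟩
            · have hsplit : pvTok (r.dropWhile PySem.Chars.islower) =
                  pvTok ((r.dropWhile PySem.Chars.islower).dropWhile PySem.Chars.isdigit) := by
                conv_lhs => rw [← List.takeWhile_append_dropWhile (p := PySem.Chars.isdigit)
                  (l := r.dropWhile PySem.Chars.islower)]
                exact pvTok_skip_digits _ _ (fun x hx => List.mem_takeWhile_imp hx)
              rw [pvTok_cons_upper c r h3, hsplit, ht2]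
              rfl
            · rw [hk2]
              have hm := PySem.Dict.keys_foldl_modify
                (l := [String.ofList (c :: r.takeWhile PySem.Chars.islower)]) (d0 := (0 : Int))
                (f := fun _ _ => (fun v => v + pvIntOf ((r.dropWhile PySem.Chars.islower).takeWhile PySem.Chars.isdigit)))
                (d := counts)
              simp only [List.foldl_cons, List.foldl_nil] at hm
              rw [hm]
              rfl
          · rw [pvPT_other fuel c r counts h1 h2 h3]
            obtain ⟨ts, ht, hk⟩ := ih r counts
            exact ⟨ts, by rw [pvTok_skip_one c r (by simpa using h3), ht], hk⟩

theorem pvOk_skip (k : Nat) (l r : List Char) (h : ∀ c ∈ l, c ≠ '(' ∧ c ≠ ')') :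
    pvOk k (l ++ r) = pvOk k r := by
  induction l with
  | nil => simp
  | cons c t ih =>
    have hc := h c (by simp)
    have e : pvOk k (c :: (t ++ r)) = pvOk k (t ++ r) := by
      simp only [pvOk]; simp [hc.1, hc.2]
    rw [List.cons_append, e, ih (fun x hx => h x (by simp [hx]))]

theorem pvTok_of_no_upper (l : List Char) (h : ∀ c ∈ l, PySem.Chars.isupper c = false) :
    pvTok l = [] := by
  have := pvTok_skip l [] h
  simpa [pvTok] using this

theorem notParen_of_islower (c : Char) (h : PySem.Chars.islower c = true) : c ≠ '(' ∧ c ≠ ')' :=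
  ⟨fun e => by subst e; exact absurd h (by decide), fun e => by subst e; exact absurd h (by decide)⟩

theorem notParen_of_isdigit (c : Char) (h : PySem.Chars.isdigit c = true) : c ≠ '(' ∧ c ≠ ')' :=
  ⟨fun e => by subst e; exact absurd h (by decide), fun e => by subst e; exact absurd h (by decide)⟩

theorem pvOk_skip_digits (k : Nat) (l r : List Char) (h : ∀ c ∈ l, PySem.Chars.isdigit c = true) :
    pvOk k (l ++ r) = pvOk k r :=
  pvOk_skip k l r (fun c hc => notParen_of_isdigit c (h c hc))

theorem pvOk_drop_digits (k : Nat) (l : List Char) (h : pvOk k l = true) :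
    pvOk k (l.dropWhile PySem.Chars.isdigit) = true := by
  conv at h => rw [← List.takeWhile_append_dropWhile (p := PySem.Chars.isdigit) (l := l)]
  rwa [pvOk_skip_digits k _ _ (fun x hx => List.mem_takeWhile_imp hx)] at h

theorem parse_nil (fuel : Nat) (counts : PySem.Dict String Int) :
    (pvParseTokens fuel [] counts).2 = [] := by
  cases fuel <;> rfl

theorem parse_consumes_all (fuel : Nat) (s : List Char) (counts : PySem.Dict String Int) (k : Nat)
    (hlen : s.length < fuel) (hok : pvOk k s = true) :
    pvTok (pvParseTokens fuel s counts).2 = [] ∨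
      (∃ k', k = k' + 1 ∧ pvOk k' (pvParseTokens fuel s counts).2 = true) := by
  induction fuel generalizing s counts k with
  | zero => exact absurd hlen (Nat.not_lt_zero _)
  | succ fuel ih =>
    cases s with
    | nil => left; rw [parse_nil]; simp [pvTok]
    | cons c r =>
      have hr : r.length < fuel := by simpa using hlen
      by_cases h1 : c = '('
      · subst h1
        rw [pvPT_paren]
        have hb' : pvOk (k+1) r = true := by simpa [pvOk] using hok
        rcases ih r PySem.Dict.empty (k+1) hr hb' with hnil | ⟨k', hk, hb2⟩
        · -- the sub-parse left only a token-free remainder; the continuation parses it away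
          have hrest : pvTok ((pvParseTokens fuel r PySem.Dict.empty).2.dropWhile PySem.Chars.isdigit) = [] := by
            conv at hnil => rw [← List.takeWhile_append_dropWhile (p := PySem.Chars.isdigit)
              (l := (pvParseTokens fuel r PySem.Dict.empty).2)]
            rwa [pvTok_skip_digits _ _ (fun x hx => List.mem_takeWhile_imp hx)] at hnil
          obtain ⟨ts, ht, _⟩ := parse_keys fuel
            ((pvParseTokens fuel r PySem.Dict.empty).2.dropWhile PySem.Chars.isdigit)
            ((pvParseTokens fuel r PySem.Dict.empty).1.items.foldl
              (fun d q => d.modify q.1 0 (fun v => v + q.2 * pvIntOf ((pvParseTokens fuel r PySem.Dict.empty).2.takeWhile PySem.Chars.isdigit)))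
              counts)
          rw [hrest] at ht
          left
          exact (List.append_eq_nil_iff.mp ht.symm).2
        · have hkk : k' = k := by omega
          rw [hkk] at hb2
          have hb3 : pvOk k ((pvParseTokens fuel r PySem.Dict.empty).2.dropWhile PySem.Chars.isdigit) = true :=
            pvOk_drop_digits k _ hb2
          have hlen2 : ((pvParseTokens fuel r PySem.Dict.empty).2.dropWhile PySem.Chars.isdigit).length < fuel :=
            lt_of_le_of_lt (le_trans (List.length_dropWhile_le _ _) (parse_rest_len fuel r PySem.Dict.empty)) hr
          exact ih _ _ k hlen2 hb3
      · by_cases h2 : c = ')'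
        · subst h2
          rw [pvPT_close]
          cases k with
          | zero =>
            left
            have hfree : ∀ x ∈ r, PySem.Chars.isupper x = false := by
              have : r.all (fun x => !PySem.Chars.isupper x) = true := by simpa [pvOk] using hok
              intro x hx
              simpa using List.all_eq_true.mp this x hx
            exact pvTok_of_no_upper r hfree
          | succ k' => exact Or.inr ⟨k', rfl, by simpa [pvOk] using hok⟩
        · have hb' : pvOk k r = true := by
            have e : pvOk k (c :: r) = pvOk k r := by
              simp only [pvOk]; simp [h1, h2]
            rwa [e] at hok
          by_cases h3 : PySem.Chars.isupper c
          · rw [pvPT_upper fuel c r counts h1 h2 h3]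
            have hb1 : pvOk k (r.dropWhile PySem.Chars.islower) = true := by
              conv at hb' => rw [← List.takeWhile_append_dropWhile (p := PySem.Chars.islower) (l := r)]
              rwa [pvOk_skip k _ _ (fun x hx => notParen_of_islower x (List.mem_takeWhile_imp hx))] at hb'
            have hb2 : pvOk k ((r.dropWhile PySem.Chars.islower).dropWhile PySem.Chars.isdigit) = true :=
              pvOk_drop_digits k _ hb1
            have hlen2 : ((r.dropWhile PySem.Chars.islower).dropWhile PySem.Chars.isdigit).length < fuel :=
              lt_of_le_of_lt (le_trans (List.length_dropWhile_le _ _) (List.length_dropWhile_le _ _)) hr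
            exact ih _ _ k hlen2 hb2
          · rw [pvPT_other fuel c r counts h1 h2 h3]
            exact ih r counts k hr hb'

theorem parse_compound_keys (c : String) (h : pvOk 0 c.toList = true) :
    (pvParseCompound c).keys = PySem.Set.update [] (pvTok c.toList) := by
  unfold pvParseCompound
  rcases parse_consumes_all (c.toList.length + 1) c.toList PySem.Dict.empty 0
      (Nat.lt_succ_self _) h with hnil | ⟨k', hk, _⟩
  · obtain ⟨ts, ht, hk⟩ := parse_keys (c.toList.length + 1) c.toList PySem.Dict.empty
    rw [hnil] at ht
    have htok : pvTok c.toList = ts := by simpa using ht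
    rw [hk, htok]
    rfl
  · exact absurd hk (by omega)

theorem fold_sets_eq (l : List String) (hb : ∀ c ∈ l, pvOk 0 c.toList = true) (acc : PySem.Set String) :
    l.foldl (fun acc c => PySem.Set.update acc (pvParseCompound c).keys) acc =
      l.foldl (fun acc c => PySem.Set.update acc (pvTok c.toList)) acc := by
  refine PySem.List.foldl_congr_mem l _ _ acc (fun acc x hx => ?_)
  rw [parse_compound_keys x (hb x hx), update_set_update_nil]

-- ===== VERDICT (by name: the statement is the Claim_ definition above) =====
theorem check_elements_spec : Claim_equal_check_elements := by
  intro reactants products _ hpre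
  unfold Spec_check_elements check_elements check_elements_alt
  have hall : ∀ c ∈ reactants ++ products, pvOk 0 c.toList = true := by
    intro c hc
    have := hpre
    unfold Pre_check_elements at this
    rw [List.all_eq_true] at this
    simpa using this c hc
  rw [fold_sets_eq reactants (fun c hc => hall c (by simp [hc])) _,
      fold_sets_eq products (fun c hc => hall c (by simp [hc])) _]
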